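-- pv_equiv track=rewrite | github.com/clamsproject/app-role-filler-binder | utils/rfb.py | parse_sequence_tags
-- ===== SOURCE A (Python) =====
-- from collections import defaultdict
-- from typing import List
--
-- def parse_sequence_tags(phrases, scene_type) -> List[dict]:
--     """
--     Parses a list of NER label-mention pairs and returns a dictionary of role-fillers.
--
--     Args:
--         phrases (List[tuple[str, str]): A list of tag-mention tuples
--         scene_type (str): The scene classification label (e.g. "credits")
--
--     Returns:
--         List[dict]: A list of dictionaries containing role-fillers in format [{"Role": role, "Filler": filler}]
--     """
--
--     try:
--         start_phrase = "ROLE" if scene_type.lower() == "credits" else "FILL"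
--         bindings = defaultdict(list)
--         cur_role = ""
--         cur_fillers = []
--
--         for phrase in phrases:
--             role, word = phrase
--             if role == start_phrase:
--                 if cur_role or cur_fillers:
--                     bindings[cur_role] = cur_fillers if cur_role not in bindings \
--                         else bindings[cur_role] + cur_fillers
--                 cur_role = ""
--                 cur_fillers = []
--
--             if role == "ROLE":
--                 cur_role = word
--             elif role == "FILL":
--                 cur_fillers.append(word)
--
--         if cur_role or cur_fillers:
--             bindings[cur_role] = cur_fillers if cur_role not in bindings \
--                 else bindings[cur_role] + cur_fillers
--
--         binding_pairs = [{"Role": role, "Filler": filler} for role, fillers in bindings.items() for filler in fillers]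
--         # Account for empty fillers
--         binding_pairs += [{"Role": role, "Filler": ""} for role, fillers in bindings.items() if len(fillers) == 0]
--         return binding_pairs
--
--     # If parsing doesn't work, the string is either invalid or empty (EAFP)
--     except Exception as e:
--         return {}
-- ===== SOURCE B (Python) =====
-- def parse_sequence_tags(phrases, scene_type):
--     """Segment-then-merge re-implementation: cut the tag stream into records at
--     each start tag, summarise each record, merge records into an ordered dict,
--     then flatten."""
--     try:
--         start_phrase = "ROLE" if scene_type.lower() == "credits" else "FILL"
--
--         # 1. segment into records, cutting before every start tag
--         records = []
--         cur = []
--         for p in phrases: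
--             if p[0] == start_phrase and cur:
--                 records.append(cur)
--                 cur = []
--             cur.append(p)
--         if cur:
--             records.append(cur)
--
--         # 2. summarise each record and merge (assign on first sight, append on repeat)
--         bindings = {}
--         for rec in records:
--             role = ""
--             fillers = []
--             for tag, word in rec:
--                 if tag == "ROLE":
--                     role = word
--                 elif tag == "FILL":
--                     fillers.append(word)
--             if role or fillers:
--                 if role in bindings:
--                     bindings[role] = bindings[role] + fillers
--                 else:
--                     bindings[role] = fillers
--
--         # 3. flatten
--         out = [{"Role": r, "Filler": f} for r, fs in bindings.items() for f in fs]
--         out += [{"Role": r, "Filler": ""} for r, fs in bindings.items() if len(fs) == 0]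
--         return out
--     except Exception:
--         return {}
-- ===== Notes on version B (the rewrite author's own statement) =====
-- stated objective: alternative
-- what changed: A keeps a running (bindings, cur_role, cur_fillers) state with an inline flush inside one loop; B first segments the tag stream into records at each start tag, then summarises each record (last ROLE word, all FILL words), then folds the records into an ordered dict and flattens.
import Mathlib
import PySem

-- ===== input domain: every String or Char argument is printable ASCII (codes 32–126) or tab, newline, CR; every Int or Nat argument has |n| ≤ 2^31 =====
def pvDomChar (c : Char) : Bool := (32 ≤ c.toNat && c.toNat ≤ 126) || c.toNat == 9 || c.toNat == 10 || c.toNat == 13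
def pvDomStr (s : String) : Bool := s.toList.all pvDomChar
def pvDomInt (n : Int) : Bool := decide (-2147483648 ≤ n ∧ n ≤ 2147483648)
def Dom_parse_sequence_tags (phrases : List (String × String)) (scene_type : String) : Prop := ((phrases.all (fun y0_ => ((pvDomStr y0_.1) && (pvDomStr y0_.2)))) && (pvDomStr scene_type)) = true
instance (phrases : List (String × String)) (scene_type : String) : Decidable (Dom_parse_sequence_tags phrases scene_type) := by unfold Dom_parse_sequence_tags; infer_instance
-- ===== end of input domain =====

-- B replaces A's single loop with running flush-state by a segment / summarise / merge / flatten
-- pipeline (alternative decomposition, same cost). On typed (String × String) inputs A's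
-- try/except never fires, so both functions are total and agree everywhere.

-- ===== PORT A =====
-- the flush `bindings[cur_role] = cur_fillers if cur_role not in bindings else bindings[cur_role] + cur_fillers`
-- guarded by `if cur_role or cur_fillers`
def pvFlushA (bindings : PySem.Dict String (List String)) (cur_role : String)
    (cur_fillers : List String) : PySem.Dict String (List String) :=
  if cur_role ≠ "" ∨ cur_fillers ≠ [] then
    match bindings.get? cur_role with
    | none => bindings.insert cur_role cur_fillers
    | some old => bindings.insert cur_role (old ++ cur_fillers)
  else bindings

-- one iteration of A's `for phrase in phrases` loop
def pvStepA (start_phrase : String)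
    (s : PySem.Dict String (List String) × String × List String)
    (phrase : String × String) : PySem.Dict String (List String) × String × List String :=
  let s := if phrase.1 == start_phrase then (pvFlushA s.1 s.2.1 s.2.2, "", ([] : List String)) else s
  if phrase.1 == "ROLE" then (s.1, phrase.2, s.2.2)
  else if phrase.1 == "FILL" then (s.1, s.2.1, s.2.2 ++ [phrase.2])
  else s

def parse_sequence_tags (phrases : List (String × String)) (scene_type : String) :
    List (List (String × String)) :=
  let start_phrase := if PySem.Str.lower scene_type == "credits" then "ROLE" else "FILL"
  let st := phrases.foldl (pvStepA start_phrase) (PySem.Dict.empty, "", [])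
  let bindings := pvFlushA st.1 st.2.1 st.2.2
  (bindings.items.flatMap (fun rf => rf.2.map (fun filler => [("Role", rf.1), ("Filler", filler)])))
    ++ ((bindings.items.filter (fun rf => rf.2.length == 0)).map (fun rf => [("Role", rf.1), ("Filler", "")]))

-- ===== PORT B =====
-- one iteration of B's segmentation loop (state: records so far, current record)
def pvSegStep (start_phrase : String)
    (s : List (List (String × String)) × List (String × String))
    (p : String × String) : List (List (String × String)) × List (String × String) :=
  if p.1 == start_phrase && !s.2.isEmpty then (s.1 ++ [s.2], [p]) else (s.1, s.2 ++ [p])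

-- B's per-record scan: role = last ROLE word, fillers = all FILL words
def pvSummarise (rec : List (String × String)) : String × List String :=
  rec.foldl (fun (s : String × List String) p =>
    if p.1 == "ROLE" then (p.2, s.2)
    else if p.1 == "FILL" then (s.1, s.2 ++ [p.2])
    else s) ("", [])

-- B's merge of one record into the ordered dict
def pvMergeB (b : PySem.Dict String (List String)) (rec : List (String × String)) :
    PySem.Dict String (List String) :=
  let rf := pvSummarise rec
  if rf.1 ≠ "" ∨ rf.2 ≠ [] then
    if b.contains rf.1 then b.insert rf.1 (b.getD rf.1 [] ++ rf.2)
    else b.insert rf.1 rf.2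
  else b

def parse_sequence_tags_alt (phrases : List (String × String)) (scene_type : String) :
    List (List (String × String)) :=
  let start_phrase := if PySem.Str.lower scene_type == "credits" then "ROLE" else "FILL"
  let sc := phrases.foldl (pvSegStep start_phrase) ([], [])
  let records := sc.1 ++ (if sc.2.isEmpty then [] else [sc.2])
  let bindings := records.foldl pvMergeB PySem.Dict.empty
  (bindings.items.flatMap (fun rf => rf.2.map (fun filler => [("Role", rf.1), ("Filler", filler)])))
    ++ ((bindings.items.filter (fun rf => rf.2.length == 0)).map (fun rf => [("Role", rf.1), ("Filler", "")]))

-- ===== PRECONDITION & SPEC =====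
def Spec_parse_sequence_tags (phrases : List (String × String)) (scene_type : String) (out : List (List (String × String))) : Prop := out = parse_sequence_tags_alt phrases scene_type
instance (phrases : List (String × String)) (scene_type : String) (out : List (List (String × String))) : Decidable (Spec_parse_sequence_tags phrases scene_type out) := by unfold Spec_parse_sequence_tags; infer_instance

-- ===== CLAIM (what is proved, stated in full; the proofs are below) =====
def Claim_equal_parse_sequence_tags : Prop := ∀ (phrases : List (String × String)) (scene_type : String), Dom_parse_sequence_tags phrases scene_type → Spec_parse_sequence_tags phrases scene_type (parse_sequence_tags phrases scene_type)

-- ===== LEMMAS AND PROOFS =====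

-- recursive characterisation of B's segmentation loop
def pvSegs (start : String) (cur : List (String × String)) :
    List (String × String) → List (List (String × String))
  | [] => if cur.isEmpty then [] else [cur]
  | p :: ps =>
    if p.1 == start && !cur.isEmpty then cur :: pvSegs start [p] ps
    else pvSegs start (cur ++ [p]) ps

theorem pvSeg_bridge (start : String) (ps : List (String × String))
    (recs : List (List (String × String))) (cur : List (String × String)) :
    (List.foldl (pvSegStep start) (recs, cur) ps).1
      ++ (if (List.foldl (pvSegStep start) (recs, cur) ps).2.isEmpty then []
          else [(List.foldl (pvSegStep start) (recs, cur) ps).2])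
    = recs ++ pvSegs start cur ps := by
  induction ps generalizing recs cur with
  | nil =>
    simp only [List.foldl_nil, pvSegs]
  | cons p ps ih =>
    simp only [List.foldl_cons, pvSegs]
    by_cases h : (p.1 == start && !cur.isEmpty) = true
    · have hstep : pvSegStep start (recs, cur) p = (recs ++ [cur], [p]) := by
        simp [pvSegStep, h]
      rw [hstep, ih, h]; simp
    · have hstep : pvSegStep start (recs, cur) p = (recs, cur ++ [p]) := by
        simp [pvSegStep, h]
      rw [hstep, ih]
      simp only [Bool.not_eq_true] at h
      rw [h]; simp

-- A's flush applied to the summary of a record is exactly B's merge of that record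
theorem pvFlush_merge (b : PySem.Dict String (List String)) (rec : List (String × String)) :
    pvFlushA b (pvSummarise rec).1 (pvSummarise rec).2 = pvMergeB b rec := by
  unfold pvFlushA pvMergeB
  by_cases hc : (pvSummarise rec).1 ≠ "" ∨ (pvSummarise rec).2 ≠ []
  · simp only [hc, if_pos]
    cases h : b.get? (pvSummarise rec).1 with
    | none =>
      have hct : b.contains (pvSummarise rec).1 = false := by
        rw [PySem.Dict.contains_eq_isSome_get?, h]; rfl
      simp [hct]
    | some old =>
      have hct : b.contains (pvSummarise rec).1 = true := by
        rw [PySem.Dict.contains_eq_isSome_get?, h]; rfl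
      have hg : b.getD (pvSummarise rec).1 [] = old :=
        PySem.Dict.getD_of_get?_eq_some b [] h
      simp [hct, hg]
  · simp [hc]

-- B's record summary extends one element at a time by the record-scan step
theorem pvSummarise_append (cur : List (String × String)) (p : String × String) :
    pvSummarise (cur ++ [p]) =
      (if p.1 == "ROLE" then (p.2, (pvSummarise cur).2)
       else if p.1 == "FILL" then ((pvSummarise cur).1, (pvSummarise cur).2 ++ [p.2])
       else pvSummarise cur) := by
  simp [pvSummarise, List.foldl_append]

-- loop invariant: running A's loop from a state whose (cur_role, cur_fillers) summarises the
-- open record `cur`, then doing the final flush, equals merging all records B would segment out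
theorem pvMain (start : String) (ps : List (String × String))
    (b : PySem.Dict String (List String)) (cur : List (String × String)) :
    pvFlushA (List.foldl (pvStepA start) (b, pvSummarise cur) ps).1
        (List.foldl (pvStepA start) (b, pvSummarise cur) ps).2.1
        (List.foldl (pvStepA start) (b, pvSummarise cur) ps).2.2
    = List.foldl pvMergeB b (pvSegs start cur ps) := by
  induction ps generalizing b cur with
  | nil =>
    simp only [List.foldl_nil, pvSegs]
    by_cases h : cur.isEmpty = true
    · have : cur = [] := by simpa using h
      subst this
      simp [pvSummarise, pvFlushA, h]
    · rw [if_neg h]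
      simpa using pvFlush_merge b cur
  | cons p ps ih =>
    simp only [List.foldl_cons, pvSegs]
    by_cases hs : (p.1 == start) = true
    · -- cut: A flushes and resets, then processes p from the empty record state
      have hstep : pvStepA start (b, pvSummarise cur) p
          = (pvFlushA b (pvSummarise cur).1 (pvSummarise cur).2, pvSummarise [p]) := by
        simp only [pvStepA, hs, if_true, pvSummarise, List.foldl_cons, List.foldl_nil]
        split_ifs <;> rfl
      by_cases hcur : cur.isEmpty = true
      · have hc : cur = [] := by simpa using hcur
        subst hc
        have hflush : pvFlushA b (pvSummarise ([] : List (String × String))).1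
            (pvSummarise ([] : List (String × String))).2 = b := by
          simp [pvSummarise, pvFlushA]
        rw [hstep, hflush]
        have hcond : (p.1 == start && !List.isEmpty ([] : List (String × String))) = false := by
          simp
        rw [hcond]
        simpa using ih b [p]
      · have hcond : (p.1 == start && !cur.isEmpty) = true := by
          simp [hs]; simpa using hcur
        rw [hstep, hcond]
        simp only [if_true, List.foldl_cons]
        rw [pvFlush_merge b cur]
        exact ih (pvMergeB b cur) [p]
    · -- no cut: A's step is exactly the record-scan step extending the open record
      have hne : (p.1 == start) = false := by simpa using hs
      have hstep : pvStepA start (b, pvSummarise cur) p = (b, pvSummarise (cur ++ [p])) := by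
        rw [pvSummarise_append]
        simp only [pvStepA, hne, Bool.false_eq_true, if_false]
        split_ifs <;> rfl
      have hcond : (p.1 == start && !cur.isEmpty) = false := by
        simp [hne]
      rw [hstep, hcond]
      simp only [Bool.false_eq_true, if_false]
      exact ih b (cur ++ [p])

-- ===== VERDICT (by name: the statement is the Claim_ definition above) =====
theorem parse_sequence_tags_spec : Claim_equal_parse_sequence_tags := by
  intro phrases scene_type _
  unfold Spec_parse_sequence_tags parse_sequence_tags parse_sequence_tags_alt
  have hmain := pvMain (if PySem.Str.lower scene_type == "credits" then "ROLE" else "FILL")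
    phrases PySem.Dict.empty []
  have hseg := pvSeg_bridge (if PySem.Str.lower scene_type == "credits" then "ROLE" else "FILL")
    phrases [] []
  simp only [pvSummarise, List.foldl_nil] at hmain
  simp only [List.nil_append] at hseg
  simp only [hmain, hseg]
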